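-- pv_equiv track=rewrite | github.com/RichardDKlein/whiteboard-py | src/arrays/array_subsets.py | array_subsets
-- ===== SOURCE A (Python) =====
-- def array_subsets(a: tuple[int, ...]) -> tuple[int, ...]:
--     """
--     Partitions an array `a` of integers into disjoint sub-arrays `arr_a`
--     and `arr_b` such that `arr_a` is the smallest possible subarray whose
--     elements sum to a greater number than the elements of `arr_b`. (Note
--     that neither `arr_a` nor `arr_b` need consist of consecutive elements
--     from `a`.)
--
--     The strategy is to first sort the given array in descending order.
--     Then, starting from the first element, keep adding elements to `arr_a`
--     until the running total of the elements in `arr_a` exceeds the running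
--     total of the remaining elements (in `arr_b`).
--
--     Performance is O(n*log(n)), due to the sorting operation.
--
--     :param a: The array to be partitioned.
--     :return: The subarray `arr_a`, with its elements in ascending order.
--     """
--     result = []
--     if a is None or len(a) == 0:
--         return ()
--     a = list(a)
--     a.reverse()
--     sum_a = 0
--     sum_b = sum(a)
--     for n in a:
--         result.append(n)
--         sum_a += n
--         sum_b -= n
--         if sum_a > sum_b:
--             break
--     result.sort()
--     return tuple(result)
-- ===== SOURCE B (Python) =====
-- def array_subsets(a):
--     if a is None or len(a) == 0:
--         return ()
--     total = sum(a)
--     cut = 0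
--     prefix = 0
--     for j, n in enumerate(a):
--         if 2 * prefix < total:
--             cut = j
--         prefix += n
--     return tuple(sorted(a[cut:]))
-- ===== Notes on version B (the rewrite author's own statement) =====
-- stated objective: alternative
-- what changed: B never reverses or breaks: it scans the ORIGINAL list forward once, keeping a running prefix sum and recording the last index j with 2*prefix < total (the dual of A's first reversed-prefix with sum exceeding the rest), then returns the sorted suffix a[cut:].
import Mathlib
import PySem

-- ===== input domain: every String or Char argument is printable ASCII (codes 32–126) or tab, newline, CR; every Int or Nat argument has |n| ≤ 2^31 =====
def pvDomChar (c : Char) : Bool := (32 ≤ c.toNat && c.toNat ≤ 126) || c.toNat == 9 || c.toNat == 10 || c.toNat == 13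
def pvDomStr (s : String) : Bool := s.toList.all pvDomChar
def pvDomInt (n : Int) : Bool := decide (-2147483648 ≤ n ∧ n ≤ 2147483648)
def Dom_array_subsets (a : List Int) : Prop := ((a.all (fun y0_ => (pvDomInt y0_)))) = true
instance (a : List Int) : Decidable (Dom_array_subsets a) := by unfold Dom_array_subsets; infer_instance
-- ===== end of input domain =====

-- B scans the original list forward (no reverse, no break), recording the last cut index with
-- 2*prefix < total, and returns the sorted suffix — the dual of A's reversed-prefix greedy; same cost.

-- ===== PORT A =====
-- the `for n in a: append; sum_a += n; sum_b -= n; if sum_a > sum_b: break` loop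
def pvLoopA (xs result : List Int) (sumA sumB : Int) : List Int :=
  match xs with
  | [] => result
  | n :: rest =>
    let result := result ++ [n]
    let sumA := sumA + n
    let sumB := sumB - n
    if sumA > sumB then result else pvLoopA rest result sumA sumB

def array_subsets (a : List Int) : List Int :=
  if a.length = 0 then []
  else
    let a := a.reverse
    let result := pvLoopA a [] 0 a.sum
    PySem.List.sorted result (fun x => x) false

-- ===== PORT B =====
-- the `for j, n in enumerate(a): if 2*prefix < total: cut = j; prefix += n` loop
def pvScanB (xs : List Int) (j : Nat) (prefix_ : Int) (cut : Nat) (total : Int) : Nat :=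
  match xs with
  | [] => cut
  | n :: rest =>
    pvScanB rest (j + 1) (prefix_ + n) (if 2 * prefix_ < total then j else cut) total

def array_subsets_alt (a : List Int) : List Int :=
  if a.length = 0 then []
  else
    let total := a.sum
    let cut := pvScanB a 0 0 0 total
    PySem.List.sorted (a.drop cut) (fun x => x) false

-- ===== PRECONDITION & SPEC =====
def Spec_array_subsets (a : List Int) (out : List Int) : Prop := out = array_subsets_alt a
instance (a : List Int) (out : List Int) : Decidable (Spec_array_subsets a out) := by unfold Spec_array_subsets; infer_instance

-- ===== CLAIM (what is proved, stated in full; the proofs are below) =====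
def Claim_equal_array_subsets : Prop := ∀ (a : List Int), Dom_array_subsets a → Spec_array_subsets a (array_subsets a)

-- ===== LEMMAS AND PROOFS =====

-- index (1-based) of A's break point, if the loop breaks
def pvBrk (T s : Int) : List Int → Option Nat
  | [] => none
  | n :: rest => if 2 * (s + n) > T then some 1 else (pvBrk T (s + n) rest).map (· + 1)

theorem pvBrk_bounds (xs : List Int) : ∀ (T s : Int) (k : Nat),
    pvBrk T s xs = some k → 1 ≤ k ∧ k ≤ xs.length := by
  induction xs with
  | nil => intro T s k h; simp [pvBrk] at h
  | cons n rest ih =>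
    intro T s k h
    simp only [pvBrk] at h
    split_ifs at h with hc
    · simp only [Option.some.injEq] at h
      simp only [List.length_cons]
      omega
    · cases hb : pvBrk T (s + n) rest with
      | none => rw [hb] at h; simp at h
      | some m =>
        rw [hb] at h; simp only [Option.map_some, Option.some.injEq] at h
        have := ih T (s + n) m hb
        simp only [List.length_cons]
        omega

theorem pvLoopA_eq (xs : List Int) : ∀ (res : List Int) (sa sb : Int),
    pvLoopA xs res sa sb = res ++ xs.take ((pvBrk (sa + sb) sa xs).getD xs.length) := by
  induction xs with
  | nil => intro res sa sb; simp [pvLoopA, pvBrk]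
  | cons n rest ih =>
    intro res sa sb
    simp only [pvLoopA, pvBrk]
    by_cases h : 2 * (sa + n) > sa + sb
    · have hgt : sa + n > sb - n := by omega
      simp [h, hgt, List.take]
    · have hng : ¬ (sa + n > sb - n) := by omega
      simp only [if_neg h, if_neg hng]
      rw [ih (res ++ [n]) (sa + n) (sb - n)]
      have hsum : sa + n + (sb - n) = sa + sb := by ring
      rw [hsum]
      cases hb : pvBrk (sa + sb) (sa + n) rest with
      | some m => simp
      | none => simp

theorem pvBrk_snoc (ys : List Int) : ∀ (T s x : Int),
    pvBrk T s (ys ++ [x]) =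
      match pvBrk T s ys with
      | some m => some m
      | none => if 2 * (s + ys.sum + x) > T then some (ys.length + 1) else none := by
  induction ys with
  | nil =>
    intro T s x
    simp only [List.nil_append, pvBrk, List.sum_nil, List.length_nil, add_zero,
      Option.map_none, Nat.zero_add]
  | cons n rest ih =>
    intro T s x
    simp only [List.cons_append, pvBrk, List.sum_cons, List.length_cons]
    by_cases h : 2 * (s + n) > T
    · simp [h]
    · simp only [if_neg h]
      rw [ih T (s + n) x]
      cases hb : pvBrk T (s + n) rest with
      | some m => simp
      | none =>
        have hs : s + n + rest.sum + x = s + (n + rest.sum) + x := by ring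
        simp only [Option.map_none, hs]
        by_cases h2 : 2 * (s + (n + rest.sum) + x) > T
        · simp [h2]
        · simp [h2]

-- the forward scan equals the (reversed) break search: duality 2*prefix < T ⇔ 2*suffix_sum > T
theorem pvScanB_eq_brk (ys : List Int) : ∀ (T s s' : Int) (j cut : Nat),
    pvScanB ys j s cut T =
      match pvBrk (2 * (s' + s + ys.sum) - T) s' ys.reverse with
      | some k => j + (ys.length - k)
      | none => cut := by
  induction ys with
  | nil => intro T s s' j cut; simp [pvScanB, pvBrk]
  | cons n rest ih =>
    intro T s s' j cut
    simp only [pvScanB, List.reverse_cons, List.sum_cons, List.length_cons]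
    rw [ih T (s + n) s' (j + 1) (if 2 * s < T then j else cut)]
    have hT : 2 * (s' + (s + n) + rest.sum) - T = 2 * (s' + s + (n + rest.sum)) - T := by ring
    rw [hT]
    rw [pvBrk_snoc]
    cases hb : pvBrk (2 * (s' + s + (n + rest.sum)) - T) s' rest.reverse with
    | some m =>
      have hm := pvBrk_bounds rest.reverse _ s' m hb
      simp only [List.length_reverse] at hm
      show j + 1 + (rest.length - m) = j + (rest.length + 1 - m)
      omega
    | none =>
      by_cases hC : 2 * (s' + rest.reverse.sum + n) > 2 * (s' + s + (n + rest.sum)) - T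
      · have hs : 2 * s < T := by
          rw [List.sum_reverse] at hC; omega
        simp only [if_pos hs, if_pos hC, List.length_reverse]
        show j = j + (rest.length + 1 - (rest.length + 1))
        omega
      · have hs : ¬ (2 * s < T) := by
          rw [List.sum_reverse] at hC; omega
        simp only [if_neg hs, if_neg hC]

theorem take_reverse_eq (a : List Int) (k : Nat) :
    (a.reverse.take k).Perm (a.drop (a.length - k)) := by
  rw [List.take_reverse]
  exact List.reverse_perm _

-- ===== VERDICT (by name: the statement is the Claim_ definition above) =====
theorem array_subsets_spec : Claim_equal_array_subsets := by
  intro a _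
  unfold Spec_array_subsets array_subsets array_subsets_alt
  by_cases h : a.length = 0
  · simp [h]
  · simp only [if_neg h]
    rw [pvLoopA_eq, pvScanB_eq_brk a a.sum 0 0 0 0]
    simp only [List.nil_append, List.sum_reverse]
    have hT : 2 * ((0 : Int) + 0 + a.sum) - a.sum = 0 + a.sum := by ring
    rw [hT]
    cases hb : pvBrk (0 + a.sum) 0 a.reverse with
    | some k =>
      simp only [Option.getD_some, Nat.zero_add]
      apply PySem.List.sorted_eq_sorted_of_perm _ _ _ (fun x y hxy => hxy)
      exact take_reverse_eq a k
    | none =>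
      simp only [Option.getD_none, List.take_length, List.drop_zero]
      apply PySem.List.sorted_eq_sorted_of_perm _ _ _ (fun x y hxy => hxy)
      exact List.reverse_perm a
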